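-- pv_equiv track=rewrite | github.com/JakubMlocek/Algorithms_and_Data_Structures | exercisesFromClasses/class8.py | safetyFly
-- ===== SOURCE A (Python) =====
-- def safetyFly( G, s, e, ceiling, difference ):
--     visited = [False] * len(G)
--
--     def DFSvisit(G, u):
--         visited[u] = True
--         for each in G[u]:
--             v = each[0]
--             weight = each[1]
--             if not visited[v] and abs(weight - ceiling) <= difference:
--                 DFSvisit(G, v)
--
--     DFSvisit(G, s)
--     return visited[e]
-- ===== SOURCE B (Python) =====
-- def safetyFly(G, s, e, ceiling, difference):
--     n = len(G)
--     reach = [False] * n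
--     reach[s] = True
--     for _ in range(n):
--         for u in range(n):
--             if reach[u]:
--                 for v, weight in G[u]:
--                     if abs(weight - ceiling) <= difference:
--                         reach[v] = True
--     return reach[e]
-- ===== Notes on version B (the rewrite author's own statement) =====
-- stated objective: alternative
-- what changed: Replaced the recursive closure-based DFS by Bellman-Ford-style round saturation: n rounds, each sweeping all nodes and marking every filter-passing successor of an already reached node, with no recursion and no stack; the answer is the final mark of e.
import Mathlib
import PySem

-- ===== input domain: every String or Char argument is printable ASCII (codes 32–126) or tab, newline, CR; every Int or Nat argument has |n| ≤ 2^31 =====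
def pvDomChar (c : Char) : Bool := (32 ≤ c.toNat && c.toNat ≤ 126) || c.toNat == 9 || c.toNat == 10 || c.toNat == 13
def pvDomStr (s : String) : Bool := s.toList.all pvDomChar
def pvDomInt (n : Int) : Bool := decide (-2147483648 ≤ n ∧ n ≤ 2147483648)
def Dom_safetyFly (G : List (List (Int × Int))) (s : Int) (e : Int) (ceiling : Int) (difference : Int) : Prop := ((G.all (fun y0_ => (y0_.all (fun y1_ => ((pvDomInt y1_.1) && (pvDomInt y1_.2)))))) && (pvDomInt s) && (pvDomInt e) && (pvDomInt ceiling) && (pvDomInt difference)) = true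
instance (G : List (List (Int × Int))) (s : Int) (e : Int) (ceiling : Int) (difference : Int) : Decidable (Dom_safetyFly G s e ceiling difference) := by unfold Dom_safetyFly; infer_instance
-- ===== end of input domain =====

-- B replaces A's recursive closure-based DFS by round-based fixed-point saturation:
-- n rounds, each sweeping all nodes and marking every filtered successor of an already
-- reached node; no recursion and no stack, a different (Bellman-Ford-style) algorithm.

-- Python index semantics on a list of length n (negative index counts from the end);
-- within Pre_ every used index lies in [-n, n), exactly where Python indexing returns.
def pvIdx (n : Nat) (v : Int) : Nat := (if v < 0 then v + (n : Int) else v).toNat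

-- abs(weight - ceiling) <= difference (A's filter)
def pvCond (ceiling difference w : Int) : Bool := decide (((w - ceiling).natAbs : Int) ≤ difference)

-- ===== PORT A =====
-- DFSvisit: marks u, then for each (v, weight) in G[u], if v unvisited and the weight
-- passes the filter, recurse.  Fuel only makes the recursion total in Lean.
def pvDfsA (G : List (List (Int × Int))) (ceiling difference : Int) : Nat → List Bool → Nat → List Bool
  | 0, vis, _ => vis
  | Nat.succ fuel, vis, u =>
    (G.getD u []).foldl (fun vis p =>
      let v := pvIdx G.length p.1
      if !(vis.getD v false) && pvCond ceiling difference p.2 then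
        pvDfsA G ceiling difference fuel vis v
      else vis) (vis.set u true)

def safetyFly (G : List (List (Int × Int))) (s : Int) (e : Int) (ceiling : Int) (difference : Int) : Bool :=
  let visited := List.replicate G.length false
  let visited := pvDfsA G ceiling difference (G.length + 1) visited (pvIdx G.length s)
  visited.getD (pvIdx G.length e) false

-- ===== PORT B =====
-- abs(weight - ceiling) <= difference (B's filter, written with Int.abs)
def pvOk (ceiling difference w : Int) : Bool := decide (|w - ceiling| ≤ difference)

-- one saturation round: for u in range(n): if reach[u]: for (v, weight) in G[u]:
--   if the weight passes the filter, reach[v] = True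
def pvRoundB (G : List (List (Int × Int))) (ceiling difference : Int) (reach : List Bool) : List Bool :=
  (PySem.List.pyRange 0 (G.length : Int) 1).foldl (fun reach u =>
    if PySem.List.pyGetD reach u false then
      (PySem.List.pyGetD G u []).foldl (fun reach p =>
        if pvOk ceiling difference p.2 then PySem.List.pySetD reach p.1 true else reach) reach
    else reach) reach

def safetyFly_alt (G : List (List (Int × Int))) (s : Int) (e : Int) (ceiling : Int) (difference : Int) : Bool :=
  let n := G.length
  let reach := PySem.List.pySetD (List.replicate n false) s true
  let reach := (PySem.List.pyRange 0 (n : Int) 1).foldl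
      (fun reach _ => pvRoundB G ceiling difference reach) reach
  PySem.List.pyGetD reach e false

-- ===== PRECONDITION & SPEC =====
-- Pre_ is exactly where A returns: s and e are valid Python indices into the n node
-- lists (in [-n, n)), and every node the filtered traversal can reach from s (a node is
-- reachable iff it lies in every subset of range n that contains s and is closed under
-- in-range filter-passing edges) has all its edge targets in [-n, n); outside Pre_ the
-- traversal touches an out-of-range index and A raises IndexError.
def Pre_safetyFly (G : List (List (Int × Int))) (s : Int) (e : Int) (ceiling : Int) (difference : Int) : Prop :=
  -(G.length : Int) ≤ s ∧ s < G.length ∧ -(G.length : Int) ≤ e ∧ e < G.length ∧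
  ∀ u ∈ Finset.range G.length,
    (∀ S ∈ (Finset.range G.length).powerset,
        pvIdx G.length s ∈ S →
        (∀ w ∈ S, ∀ p ∈ G.getD w [],
           (-(G.length : Int) ≤ p.1 ∧ p.1 < G.length ∧ pvCond ceiling difference p.2 = true) →
           pvIdx G.length p.1 ∈ S) →
        u ∈ S) →
    ∀ p ∈ G.getD u [], -(G.length : Int) ≤ p.1 ∧ p.1 < G.length

instance (G : List (List (Int × Int))) (s : Int) (e : Int) (ceiling : Int) (difference : Int) : Decidable (Pre_safetyFly G s e ceiling difference) := by unfold Pre_safetyFly; infer_instance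

def pvWitness_safetyFly : (List (List (Int × Int))) × Int × Int × Int × Int :=
  ([[(1, 5)], [(-2, 3)]], 0, 1, 4, 2)

def Spec_safetyFly (G : List (List (Int × Int))) (s : Int) (e : Int) (ceiling : Int) (difference : Int) (out : Bool) : Prop := out = safetyFly_alt G s e ceiling difference
instance (G : List (List (Int × Int))) (s : Int) (e : Int) (ceiling : Int) (difference : Int) (out : Bool) : Decidable (Spec_safetyFly G s e ceiling difference out) := by unfold Spec_safetyFly; infer_instance

-- ===== CLAIM (what is proved, stated in full; the proofs are below) =====
def Claim_equal_safetyFly : Prop := ∀ (G : List (List (Int × Int))) (s : Int) (e : Int) (ceiling : Int) (difference : Int), Dom_safetyFly G s e ceiling difference → Pre_safetyFly G s e ceiling difference → Spec_safetyFly G s e ceiling difference (safetyFly G s e ceiling difference)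

-- ===== LEMMAS AND PROOFS =====

-- node x is marked in the visited list
def pvMarked (vis : List Bool) (x : Nat) : Prop := vis.getD x false = true

-- one filtered edge from u to v
def pvStep (G : List (List (Int × Int))) (ceiling difference : Int) (u v : Nat) : Prop :=
  ∃ p ∈ G.getD u [], pvIdx G.length p.1 = v ∧ pvCond ceiling difference p.2 = true

theorem pvIdx_lt (n : Nat) (v : Int) (h1 : -(n : Int) ≤ v) (h2 : v < n) : pvIdx n v < n := by
  unfold pvIdx; split <;> omega

theorem pvFoldlPres {α σ : Type} (P : σ → Prop) (f : σ → α → σ) :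
    ∀ (l : List α) (s : σ), P s → (∀ s a, a ∈ l → P s → P (f s a)) → P (l.foldl f s) := by
  intro l
  induction l with
  | nil => intro s hs _; simpa using hs
  | cons a t ih =>
    intro s hs h
    simp only [List.foldl_cons]
    exact ih _ (h s a (by simp) hs) (fun s b hb => h s b (by simp [hb]))

theorem pvGetD_set (l : List Bool) (i x : Nat) :
    (l.set i true).getD x false = (if x = i ∧ i < l.length then true else l.getD x false) := by
  induction l generalizing i x with
  | nil => simp [List.getD]
  | cons b t ih =>
    cases i with
    | zero =>
      cases x with
      | zero => simp
      | succ x => simp [List.getD]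
    | succ i =>
      cases x with
      | zero => simp [List.getD]
      | succ x =>
        simp only [List.set, List.getD_cons_succ, List.length_cons]
        rw [ih]
        by_cases h : x = i ∧ i < t.length <;> simp [h] <;> omega

theorem pvMarked_set_self (vis : List Bool) (u : Nat) (h : u < vis.length) :
    pvMarked (vis.set u true) u := by
  unfold pvMarked; rw [pvGetD_set]; simp [h]

theorem pvMarked_set_mono (vis : List Bool) (u x : Nat) (h : pvMarked vis x) :
    pvMarked (vis.set u true) x := by
  unfold pvMarked at *; rw [pvGetD_set]
  split
  · rfl
  · exact h

theorem pvMarked_set_cases (vis : List Bool) (u x : Nat) (h : pvMarked (vis.set u true) x) :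
    x = u ∨ pvMarked vis x := by
  unfold pvMarked at *; rw [pvGetD_set] at h
  by_cases hc : x = u ∧ u < vis.length
  · exact Or.inl hc.1
  · right; simpa [hc] using h

theorem pvMarked_lt (vis : List Bool) (x : Nat) (h : pvMarked vis x) : x < vis.length := by
  by_contra hx
  unfold pvMarked at h
  rw [List.getD_eq_default] at h
  · exact Bool.false_ne_true h
  · omega

theorem pvMarked_replicate (n x : Nat) : ¬ pvMarked (List.replicate n false) x := by
  intro h
  have hx := pvMarked_lt _ _ h
  simp at hx
  unfold pvMarked at h
  rw [List.getD_eq_getElem _ _ (by simpa using hx)] at h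
  simp at h

theorem pvCount_set (l : List Bool) (i : Nat) (h : i < l.length) (hf : l.getD i false = false) :
    (l.set i true).count false + 1 = l.count false := by
  induction l generalizing i with
  | nil => simp at h
  | cons b t ih =>
    cases i with
    | zero =>
      simp only [List.getD_cons_zero] at hf
      subst hf
      simp
    | succ i =>
      simp only [List.getD_cons_succ] at hf
      simp only [List.length_cons, Nat.succ_lt_succ_iff] at h
      simp only [List.set, List.count_cons]
      have := ih i h hf
      omega

theorem pvCount_pos (l : List Bool) (i : Nat) (h : i < l.length) (hf : l.getD i false = false) :
    0 < l.count false := by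
  have := pvCount_set l i h hf
  omega

-- length preservation
theorem pvDfsA_length (G : List (List (Int × Int))) (c d : Int) :
    ∀ (fuel : Nat) (vis : List Bool) (u : Nat),
      (pvDfsA G c d fuel vis u).length = vis.length := by
  intro fuel
  induction fuel with
  | zero => intro vis u; simp [pvDfsA]
  | succ fuel ih =>
    intro vis u
    simp only [pvDfsA]
    refine pvFoldlPres (fun w : List Bool => w.length = vis.length) _
      (G.getD u []) (vis.set u true) (by simp) ?_
    intro w p _ hw
    dsimp only
    split
    · rw [ih]; exact hw
    · exact hw

-- marks only grow
theorem pvDfsA_mono (G : List (List (Int × Int))) (c d : Int) :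
    ∀ (fuel : Nat) (vis : List Bool) (u x : Nat),
      pvMarked vis x → pvMarked (pvDfsA G c d fuel vis u) x := by
  intro fuel
  induction fuel with
  | zero => intro vis u x h; simpa [pvDfsA] using h
  | succ fuel ih =>
    intro vis u x h
    simp only [pvDfsA]
    refine pvFoldlPres (fun w : List Bool => pvMarked w x) _
      (G.getD u []) (vis.set u true) (pvMarked_set_mono _ _ _ h) ?_
    intro w p _ hw
    dsimp only
    split
    · exact ih w _ x hw
    · exact hw

-- soundness: every mark produced is reachable from u
theorem pvDfsA_sound (G : List (List (Int × Int))) (c d : Int) :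
    ∀ (fuel : Nat) (vis : List Bool) (u x : Nat),
      pvMarked (pvDfsA G c d fuel vis u) x →
      pvMarked vis x ∨ Relation.ReflTransGen (pvStep G c d) u x := by
  intro fuel
  induction fuel with
  | zero => intro vis u x h; exact Or.inl (by simpa [pvDfsA] using h)
  | succ fuel ih =>
    intro vis u x h
    simp only [pvDfsA] at h
    refine pvFoldlPres
      (fun w : List Bool => ∀ y, pvMarked w y →
        pvMarked vis y ∨ Relation.ReflTransGen (pvStep G c d) u y) _
      (G.getD u []) (vis.set u true) ?_ ?_ x h
    · intro y hy
      rcases pvMarked_set_cases _ _ _ hy with rfl | hv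
      · exact Or.inr Relation.ReflTransGen.refl
      · exact Or.inl hv
    · intro w p hp hw y hy
      split at hy
      · rename_i hcond
        rcases ih w _ y hy with hold | hr
        · exact hw y hold
        · refine Or.inr (Relation.ReflTransGen.head ?_ hr)
          refine ⟨p, hp, rfl, ?_⟩
          simp only [Bool.and_eq_true] at hcond
          exact hcond.2
      · exact hw y hy

-- completeness bundle: with enough fuel, the call marks u, marks all filtered
-- successors of u, shrinks the false-count, and the set of new marks is step-closed
theorem pvDfsA_complete (G : List (List (Int × Int))) (c d : Int) (r : Nat)
    (HG : ∀ x, Relation.ReflTransGen (pvStep G c d) r x →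
      ∀ p ∈ G.getD x [], pvIdx G.length p.1 < G.length) :
    ∀ (fuel : Nat) (vis : List Bool) (u : Nat),
      Relation.ReflTransGen (pvStep G c d) r u →
      vis.length = G.length → u < G.length → ¬ pvMarked vis u →
      vis.count false ≤ fuel →
      (pvMarked (pvDfsA G c d fuel vis u) u ∧
       (pvDfsA G c d fuel vis u).count false + 1 ≤ vis.count false ∧
       (∀ p ∈ G.getD u [], pvCond c d p.2 = true →
          pvMarked (pvDfsA G c d fuel vis u) (pvIdx G.length p.1)) ∧
       (∀ x, pvMarked (pvDfsA G c d fuel vis u) x → ¬ pvMarked vis x →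
          ∀ y, pvStep G c d x y → pvMarked (pvDfsA G c d fuel vis u) y)) := by
  intro fuel
  induction fuel with
  | zero =>
    intro vis u _ hlen hu hnm hcount
    exfalso
    have h0 : 0 < vis.count false := pvCount_pos vis u (by omega) (by
      unfold pvMarked at hnm
      cases h : vis.getD u false
      · rfl
      · exact absurd h hnm)
    omega
  | succ fuel ih =>
    intro vis u hru hlen hu hnm hcount
    have hgetu : vis.getD u false = false := by
      unfold pvMarked at hnm
      cases h : vis.getD u false
      · rfl
      · exact absurd h hnm
    have hcset : (vis.set u true).count false + 1 = vis.count false :=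
      pvCount_set vis u (by omega) hgetu
    -- the inner fold lemma
    have FA : ∀ (l : List (Int × Int)), (∀ p ∈ l, p ∈ G.getD u []) →
        ∀ visc : List Bool, visc.length = G.length → visc.count false ≤ fuel →
        pvMarked visc u →
        (∀ x, pvMarked visc x → ¬ pvMarked vis x → x ≠ u →
           ∀ y, pvStep G c d x y → pvMarked visc y) →
        ((l.foldl (fun vis p =>
            let v := pvIdx G.length p.1
            if !(vis.getD v false) && pvCond c d p.2 then
              pvDfsA G c d fuel vis v
            else vis) visc).length = G.length ∧
         (l.foldl (fun vis p =>
            let v := pvIdx G.length p.1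
            if !(vis.getD v false) && pvCond c d p.2 then
              pvDfsA G c d fuel vis v
            else vis) visc).count false ≤ visc.count false ∧
         (∀ x, pvMarked visc x → pvMarked (l.foldl (fun vis p =>
            let v := pvIdx G.length p.1
            if !(vis.getD v false) && pvCond c d p.2 then
              pvDfsA G c d fuel vis v
            else vis) visc) x) ∧
         (∀ p ∈ l, pvCond c d p.2 = true → pvMarked (l.foldl (fun vis p =>
            let v := pvIdx G.length p.1
            if !(vis.getD v false) && pvCond c d p.2 then
              pvDfsA G c d fuel vis v
            else vis) visc) (pvIdx G.length p.1)) ∧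
         (∀ x, pvMarked (l.foldl (fun vis p =>
            let v := pvIdx G.length p.1
            if !(vis.getD v false) && pvCond c d p.2 then
              pvDfsA G c d fuel vis v
            else vis) visc) x → ¬ pvMarked vis x → x ≠ u →
           ∀ y, pvStep G c d x y → pvMarked (l.foldl (fun vis p =>
            let v := pvIdx G.length p.1
            if !(vis.getD v false) && pvCond c d p.2 then
              pvDfsA G c d fuel vis v
            else vis) visc) y)) := by
      intro l
      induction l with
      | nil =>
        intro _ visc h1 h2 h3 h4
        refine ⟨h1, le_refl _, fun x hx => hx, by simp, ?_⟩
        simpa using h4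
      | cons p l' ihl =>
        intro hl visc h1 h2 h3 h4
        have hpadj : p ∈ G.getD u [] := hl p (by simp)
        have hv : pvIdx G.length p.1 < G.length := HG u hru p hpadj
        have hl' : ∀ q ∈ l', q ∈ G.getD u [] :=
          fun q hq => hl q (by simp [hq])
        simp only [List.foldl_cons]
        by_cases hb : (!(visc.getD (pvIdx G.length p.1) false) && pvCond c d p.2) = true
        · -- recursive call
          have hbm : visc.getD (pvIdx G.length p.1) false = false := by
            simp only [Bool.and_eq_true, Bool.not_eq_true'] at hb
            exact hb.1
          have hbc : pvCond c d p.2 = true := by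
            simp only [Bool.and_eq_true] at hb
            exact hb.2
          obtain ⟨IH1, IH2, IH3, IH4⟩ := ih visc (pvIdx G.length p.1)
            (hru.tail ⟨p, hpadj, rfl, hbc⟩) h1 hv
            (by unfold pvMarked; rw [hbm]; simp) h2
          have hmono2 : ∀ x, pvMarked visc x →
              pvMarked (pvDfsA G c d fuel visc (pvIdx G.length p.1)) x :=
            fun x hx => pvDfsA_mono G c d fuel visc _ x hx
          have hlen2 : (pvDfsA G c d fuel visc (pvIdx G.length p.1)).length = G.length := by
            rw [pvDfsA_length]; exact h1
          have hcl2 : ∀ x, pvMarked (pvDfsA G c d fuel visc (pvIdx G.length p.1)) x →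
              ¬ pvMarked vis x → x ≠ u →
              ∀ y, pvStep G c d x y →
                pvMarked (pvDfsA G c d fuel visc (pvIdx G.length p.1)) y := by
            intro x hx hnvx hxu y hstep
            by_cases hvc : pvMarked visc x
            · exact hmono2 y (h4 x hvc hnvx hxu y hstep)
            · exact IH4 x hx hvc y hstep
          obtain ⟨C1, C2, C3, C4, C5⟩ := ihl hl'
            (pvDfsA G c d fuel visc (pvIdx G.length p.1)) hlen2 (by omega)
            (hmono2 u h3) hcl2
          have hsimp : (if !(visc.getD (pvIdx G.length p.1) false) && pvCond c d p.2 then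
              pvDfsA G c d fuel visc (pvIdx G.length p.1) else visc)
              = pvDfsA G c d fuel visc (pvIdx G.length p.1) := by
            rw [if_pos hb]
          refine ⟨by rw [hsimp]; exact C1, ?_, ?_, ?_, ?_⟩
          · rw [hsimp]
            exact le_trans C2 (by omega)
          · intro x hx
            rw [hsimp]
            exact C3 x (hmono2 x hx)
          · intro q hq hqc
            rw [hsimp]
            rcases List.mem_cons.mp hq with rfl | hq'
            · exact C3 _ IH1
            · exact C4 q hq' hqc
          · intro x hx hnvx hxu y hstep
            rw [hsimp] at hx ⊢
            exact C5 x hx hnvx hxu y hstep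
        · -- no recursion: condition false
          have hsimp : (if !(visc.getD (pvIdx G.length p.1) false) && pvCond c d p.2 then
              pvDfsA G c d fuel visc (pvIdx G.length p.1) else visc) = visc := by
            rw [if_neg hb]
          obtain ⟨C1, C2, C3, C4, C5⟩ := ihl hl' visc h1 h2 h3 h4
          refine ⟨by rw [hsimp]; exact C1, by rw [hsimp]; exact C2,
            ?_, ?_, ?_⟩
          · intro x hx
            rw [hsimp]
            exact C3 x hx
          · intro q hq hqc
            rw [hsimp]
            rcases List.mem_cons.mp hq with rfl | hq'
            · -- the condition failed but cond is true, so the node was already marked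
              have : pvMarked visc (pvIdx G.length q.1) := by
                unfold pvMarked
                by_contra hmm
                apply hb
                simp only [Bool.and_eq_true, Bool.not_eq_true']
                refine ⟨?_, hqc⟩
                cases hgg : visc.getD (pvIdx G.length q.1) false
                · rfl
                · exact absurd hgg hmm
              exact C3 _ this
            · exact C4 q hq' hqc
          · intro x hx hnvx hxu y hstep
            rw [hsimp] at hx ⊢
            exact C5 x hx hnvx hxu y hstep
    -- assemble
    have hmarkset : pvMarked (vis.set u true) u := pvMarked_set_self vis u (by omega)
    have hinit : ∀ x, pvMarked (vis.set u true) x → ¬ pvMarked vis x → x ≠ u →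
        ∀ y, pvStep G c d x y → pvMarked (vis.set u true) y := by
      intro x hx hnvx hxu
      rcases pvMarked_set_cases _ _ _ hx with rfl | hv
      · exact absurd rfl hxu
      · exact absurd hv hnvx
    obtain ⟨C1, C2, C3, C4, C5⟩ := FA (G.getD u []) (fun p hp => hp) (vis.set u true)
      (by simpa using hlen) (by omega) hmarkset hinit
    have hunfold : pvDfsA G c d (fuel + 1) vis u = (G.getD u []).foldl (fun vis p =>
        let v := pvIdx G.length p.1
        if !(vis.getD v false) && pvCond c d p.2 then
          pvDfsA G c d fuel vis v
        else vis) (vis.set u true) := rfl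
    rw [hunfold]
    refine ⟨C3 u hmarkset, by omega, C4, ?_⟩
    intro x hx hnvx y hstep
    by_cases hxu : x = u
    · subst hxu
      obtain ⟨p, hp, hidx, hcond⟩ := hstep
      have := C4 p hp hcond
      rwa [hidx] at this
    · exact C5 x hx hnvx hxu y hstep


-- ===== B-side lemmas =====

-- B's filter is A's filter
theorem pvOk_eq_cond (c d w : Int) : pvOk c d w = pvCond c d w := by
  unfold pvOk pvCond
  rw [Int.abs_eq_natAbs]

-- Python index resolution for a valid (possibly negative) index
theorem pvPyIdx_in (n : Nat) (i : Int) (h1 : -(n : Int) ≤ i) (h2 : i < n) :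
    PySem.List.pyIdx? n i = some (pvIdx n i) := by
  unfold PySem.List.pyIdx? pvIdx
  by_cases hneg : i < 0
  · rw [if_neg (by omega), if_pos (by omega), if_pos hneg]
    congr 1
    omega
  · rw [if_pos (by omega), if_pos h2, if_neg hneg]

theorem pvPyGetD_idx {α : Type} (xs : List α) (i : Int) (d : α)
    (h1 : -(xs.length : Int) ≤ i) (h2 : i < xs.length) :
    PySem.List.pyGetD xs i d = xs.getD (pvIdx xs.length i) d := by
  unfold PySem.List.pyGetD PySem.List.pyGet?
  rw [pvPyIdx_in _ _ h1 h2]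
  simp [List.getD_eq_getElem?_getD]

theorem pvPySetD_idx {α : Type} (xs : List α) (i : Int) (v : α)
    (h1 : -(xs.length : Int) ≤ i) (h2 : i < xs.length) :
    PySem.List.pySetD xs i v = xs.set (pvIdx xs.length i) v := by
  unfold PySem.List.pySetD PySem.List.pySet?
  rw [pvPyIdx_in _ _ h1 h2]
  simp

theorem pvMarked_pySetD_mono (xs : List Bool) (i : Int) (x : Nat) (h : pvMarked xs x) :
    pvMarked (PySem.List.pySetD xs i true) x := by
  unfold PySem.List.pySetD PySem.List.pySet?
  cases hk : PySem.List.pyIdx? xs.length i with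
  | none => simpa using h
  | some k => simpa using pvMarked_set_mono xs k x h

-- the inner edge loop and the node sweep of a round, on Nat indices
def pvInner (c d : Int) (l : List (Int × Int)) (reach : List Bool) : List Bool :=
  l.foldl (fun reach p => if pvOk c d p.2 then PySem.List.pySetD reach p.1 true else reach) reach

def pvRoundN (G : List (List (Int × Int))) (c d : Int) (reach : List Bool) : List Bool :=
  (List.range G.length).foldl (fun reach u =>
    if reach.getD u false then pvInner c d (G.getD u []) reach else reach) reach

theorem pvRoundB_eq (G : List (List (Int × Int))) (c d : Int) :
    pvRoundB G c d = pvRoundN G c d := by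
  funext reach
  unfold pvRoundB pvRoundN pvInner
  rw [PySem.List.pyRange_zero_natCast, List.foldl_map]
  simp only [PySem.List.pyGetD_natCast]

theorem pvInner_cons (c d : Int) (p : Int × Int) (t : List (Int × Int)) (w : List Bool) :
    pvInner c d (p :: t) w =
      pvInner c d t (if pvOk c d p.2 then PySem.List.pySetD w p.1 true else w) := rfl

theorem pvInner_mono (c d : Int) :
    ∀ (l : List (Int × Int)) (w : List Bool) (x : Nat),
      pvMarked w x → pvMarked (pvInner c d l w) x := by
  intro l
  induction l with
  | nil => intro w x h; simpa [pvInner] using h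
  | cons p t ih =>
    intro w x h
    rw [pvInner_cons]
    apply ih
    split
    · exact pvMarked_pySetD_mono _ _ _ h
    · exact h

theorem pvInner_length (c d : Int) :
    ∀ (l : List (Int × Int)) (w : List Bool), (pvInner c d l w).length = w.length := by
  intro l
  induction l with
  | nil => intro w; simp [pvInner]
  | cons p t ih =>
    intro w
    rw [pvInner_cons]
    rw [ih]
    split
    · exact PySem.List.length_pySetD _ _ _
    · rfl

theorem pvInner_marks (c d : Int) :
    ∀ (l : List (Int × Int)) (w : List Bool) (p : Int × Int), p ∈ l →
      pvOk c d p.2 = true → -(w.length : Int) ≤ p.1 → p.1 < w.length →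
      pvMarked (pvInner c d l w) (pvIdx w.length p.1) := by
  intro l
  induction l with
  | nil => intro w p hp; simp at hp
  | cons q t ih =>
    intro w p hp hok h1 h2
    rw [pvInner_cons]
    rcases List.mem_cons.mp hp with rfl | hp'
    · rw [if_pos hok, pvPySetD_idx _ _ _ h1 h2]
      exact pvInner_mono c d t _ _
        (pvMarked_set_self _ _ (by have := pvIdx_lt w.length p.1 h1 h2; omega))
    · have hlen : (if pvOk c d q.2 then PySem.List.pySetD w q.1 true else w).length = w.length := by
        split
        · exact PySem.List.length_pySetD _ _ _
        · rfl
      have := ih (if pvOk c d q.2 then PySem.List.pySetD w q.1 true else w) p hp' hok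
        (by rw [hlen]; exact h1) (by rw [hlen]; exact h2)
      rwa [hlen] at this

theorem pvRoundN_mono (G : List (List (Int × Int))) (c d : Int) (w : List Bool) (x : Nat)
    (h : pvMarked w x) : pvMarked (pvRoundN G c d w) x := by
  unfold pvRoundN
  refine pvFoldlPres (fun w : List Bool => pvMarked w x) _ _ w h ?_
  intro w' u _ hw
  dsimp only
  split
  · exact pvInner_mono c d _ _ _ hw
  · exact hw

theorem pvRoundN_length (G : List (List (Int × Int))) (c d : Int) (w : List Bool) :
    (pvRoundN G c d w).length = w.length := by
  unfold pvRoundN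
  refine pvFoldlPres (fun w' : List Bool => w'.length = w.length) _ _ w rfl ?_
  intro w' u _ hw
  dsimp only
  split
  · rw [pvInner_length]; exact hw
  · exact hw

-- counts of unreached nodes under pointwise mark growth
theorem pvCount_le_of_marks :
    ∀ (a b : List Bool), a.length = b.length → (∀ i, pvMarked a i → pvMarked b i) →
      b.count false ≤ a.count false := by
  intro a
  induction a with
  | nil => intro b hlen _; cases b <;> simp_all
  | cons x xs ih =>
    intro b hlen hm
    cases b with
    | nil => simp at hlen
    | cons y ys =>
      have h0 : x = true → y = true := by
        intro hx
        have := hm 0 (by unfold pvMarked; simpa using hx)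
        unfold pvMarked at this
        simpa using this
      have htail : ∀ i, pvMarked xs i → pvMarked ys i := by
        intro i hi
        have := hm (i + 1) (by unfold pvMarked at hi ⊢; simpa using hi)
        unfold pvMarked at this ⊢
        simpa using this
      have hlen' : xs.length = ys.length := by simpa using hlen
      have := ih ys hlen' htail
      cases x with
      | true =>
        have hy := h0 rfl
        subst hy
        simpa [List.count_cons] using this
      | false =>
        cases y <;> simp [List.count_cons] <;> omega

theorem pvCount_lt_of_ne :
    ∀ (a b : List Bool), a.length = b.length → (∀ i, pvMarked a i → pvMarked b i) →
      a ≠ b → b.count false < a.count false := by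
  intro a
  induction a with
  | nil => intro b hlen _ hne; cases b <;> simp_all
  | cons x xs ih =>
    intro b hlen hm hne
    cases b with
    | nil => simp at hlen
    | cons y ys =>
      have h0 : x = true → y = true := by
        intro hx
        have := hm 0 (by unfold pvMarked; simpa using hx)
        unfold pvMarked at this
        simpa using this
      have htail : ∀ i, pvMarked xs i → pvMarked ys i := by
        intro i hi
        have := hm (i + 1) (by unfold pvMarked at hi ⊢; simpa using hi)
        unfold pvMarked at this ⊢
        simpa using this
      have hlen' : xs.length = ys.length := by simpa using hlen
      by_cases hxy : x = y
      · subst hxy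
        have hne' : xs ≠ ys := by
          intro h; exact hne (by rw [h])
        have := ih ys hlen' htail hne'
        cases x <;> simp [List.count_cons] <;> omega
      · have hx : x = false := by
          cases x
          · rfl
          · exact absurd (h0 rfl).symm hxy
        have hy : y = true := by
          cases y
          · exact absurd (by rw [hx]) hxy
          · rfl
        subst hx hy
        have := pvCount_le_of_marks xs ys hlen' htail
        simp only [List.count_cons]
        simp
        omega

theorem pvRoundN_decrease (G : List (List (Int × Int))) (c d : Int) (w : List Bool)
    (h : pvRoundN G c d w ≠ w) :
    (pvRoundN G c d w).count false < w.count false :=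
  pvCount_lt_of_ne w (pvRoundN G c d w) (pvRoundN_length G c d w).symm
    (fun x => pvRoundN_mono G c d w x) (fun he => h he.symm)

-- a reached node's filtered successors are all marked after one more round
theorem pvRoundN_marks (G : List (List (Int × Int))) (c d : Int) (w : List Bool)
    (hlen : w.length = G.length) (u : Nat) (hu : u < G.length) (hmu : pvMarked w u)
    (p : Int × Int) (hp : p ∈ G.getD u []) (hok : pvOk c d p.2 = true)
    (h1 : -(G.length : Int) ≤ p.1) (h2 : p.1 < G.length) :
    pvMarked (pvRoundN G c d w) (pvIdx G.length p.1) := by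
  obtain ⟨l1, l2, hsplit⟩ := List.append_of_mem (List.mem_range.mpr hu)
  unfold pvRoundN
  rw [hsplit, List.foldl_append, List.foldl_cons]
  have hbody : ∀ (l : List Nat) (w' : List Bool),
      (∀ x, pvMarked w' x → pvMarked (l.foldl (fun reach u =>
        if reach.getD u false then pvInner c d (G.getD u []) reach else reach) w') x) ∧
      (l.foldl (fun reach u =>
        if reach.getD u false then pvInner c d (G.getD u []) reach else reach) w').length
        = w'.length := by
    intro l w'
    constructor
    · intro x hx
      refine pvFoldlPres (fun w'' : List Bool => pvMarked w'' x) _ l w' hx ?_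
      intro w'' u' _ hw
      dsimp only
      split
      · exact pvInner_mono c d _ _ _ hw
      · exact hw
    · refine pvFoldlPres (fun w'' : List Bool => w''.length = w'.length) _ l w' rfl ?_
      intro w'' u' _ hw
      dsimp only
      split
      · rw [pvInner_length]; exact hw
      · exact hw
  set w1 := l1.foldl (fun reach u =>
    if reach.getD u false then pvInner c d (G.getD u []) reach else reach) w with hw1
  have hm1 : pvMarked w1 u := (hbody l1 w).1 u hmu
  have hl1 : w1.length = G.length := by rw [(hbody l1 w).2, hlen]
  have hcond : w1.getD u false = true := hm1
  rw [hcond]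
  simp only [if_true]
  refine (hbody l2 _).1 _ ?_
  have := pvInner_marks c d (G.getD u []) w1 p hp hok (by rw [hl1]; exact h1) (by rw [hl1]; exact h2)
  rwa [hl1] at this

-- folding a constant-step function over a list is iteration
theorem pvFoldl_const_iterate {α β : Type} (f : β → β) :
    ∀ (l : List α) (r : β), l.foldl (fun r _ => f r) r = f^[l.length] r := by
  intro l
  induction l with
  | nil => intro r; simp
  | cons a t ih => intro r; simp [ih, Function.iterate_succ_apply]

-- the soundness invariant: fixed length, and every mark is a reachable node
def pvGoodB (G : List (List (Int × Int))) (c d : Int) (s0 : Nat) (w : List Bool) : Prop :=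
  w.length = G.length ∧ ∀ x, pvMarked w x → Relation.ReflTransGen (pvStep G c d) s0 x

theorem pvInner_good (G : List (List (Int × Int))) (c d : Int) (s0 : Nat)
    (Hadj : ∀ u : Nat, Relation.ReflTransGen (pvStep G c d) s0 u →
      ∀ p ∈ G.getD u [], -(G.length : Int) ≤ p.1 ∧ p.1 < G.length)
    (u : Nat) (hu : Relation.ReflTransGen (pvStep G c d) s0 u) :
    ∀ (l : List (Int × Int)), (∀ p ∈ l, p ∈ G.getD u []) →
      ∀ (w : List Bool), pvGoodB G c d s0 w → pvGoodB G c d s0 (pvInner c d l w) := by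
  intro l
  induction l with
  | nil => intro _ w hw; simpa [pvInner] using hw
  | cons p t ih =>
    intro hl w hw
    rw [pvInner_cons]
    refine ih (fun q hq => hl q (by simp [hq])) _ ?_
    split
    · rename_i hok
      have hrange := Hadj u hu p (hl p (by simp))
      rw [pvPySetD_idx _ _ _ (by rw [hw.1]; exact hrange.1) (by rw [hw.1]; exact hrange.2), hw.1]
      constructor
      · rw [List.length_set]; exact hw.1
      · intro x hx
        rcases pvMarked_set_cases _ _ _ hx with rfl | hx'
        · exact hu.tail ⟨p, hl p (by simp), rfl, by rw [← pvOk_eq_cond]; exact hok⟩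
        · exact hw.2 x hx'
    · exact hw

theorem pvRoundN_good (G : List (List (Int × Int))) (c d : Int) (s0 : Nat)
    (Hadj : ∀ u : Nat, Relation.ReflTransGen (pvStep G c d) s0 u →
      ∀ p ∈ G.getD u [], -(G.length : Int) ≤ p.1 ∧ p.1 < G.length)
    (w : List Bool) (hw : pvGoodB G c d s0 w) : pvGoodB G c d s0 (pvRoundN G c d w) := by
  unfold pvRoundN
  refine pvFoldlPres (pvGoodB G c d s0) _ _ w hw ?_
  intro w' u _ hw'
  dsimp only
  by_cases hc : w'.getD u false = true
  · rw [if_pos hc]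
    exact pvInner_good G c d s0 Hadj u (hw'.2 u hc) _ (fun q hq => hq) w' hw'
  · rw [if_neg hc]
    exact hw'

theorem pvIterB_good (G : List (List (Int × Int))) (c d : Int) (s0 : Nat)
    (Hadj : ∀ u : Nat, Relation.ReflTransGen (pvStep G c d) s0 u →
      ∀ p ∈ G.getD u [], -(G.length : Int) ≤ p.1 ∧ p.1 < G.length)
    (w : List Bool) (hw : pvGoodB G c d s0 w) :
    ∀ k, pvGoodB G c d s0 ((pvRoundN G c d)^[k] w) := by
  intro k
  induction k with
  | zero => simpa using hw
  | succ k ih =>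
    rw [Function.iterate_succ_apply']
    exact pvRoundN_good G c d s0 Hadj _ ih

theorem pvIterB_mono (G : List (List (Int × Int))) (c d : Int) (w : List Bool) (x : Nat)
    (hx : pvMarked w x) : ∀ k, pvMarked ((pvRoundN G c d)^[k] w) x := by
  intro k
  induction k with
  | zero => simpa using hx
  | succ k ih =>
    rw [Function.iterate_succ_apply']
    exact pvRoundN_mono G c d _ x ih

-- after n rounds the marking is a fixed point of the round operator
theorem pvIterB_fix (G : List (List (Int × Int))) (c d : Int) (w : List Bool)
    (hc : w.count false < G.length) :
    pvRoundN G c d ((pvRoundN G c d)^[G.length] w) = (pvRoundN G c d)^[G.length] w := by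
  by_cases hex : ∃ k, k < G.length ∧
      pvRoundN G c d ((pvRoundN G c d)^[k] w) = (pvRoundN G c d)^[k] w
  · rcases hex with ⟨k, hk, hfix⟩
    have hrest : (pvRoundN G c d)^[G.length] w = (pvRoundN G c d)^[k] w := by
      have : G.length = (G.length - k) + k := by omega
      rw [this, Function.iterate_add_apply]
      exact Function.iterate_fixed hfix _
    rw [hrest]
    exact hfix
  · exfalso
    push_neg at hex
    have hgrow : ∀ k, k ≤ G.length →
        ((pvRoundN G c d)^[k] w).count false + k ≤ w.count false := by
      intro k
      induction k with
      | zero => intro _; simp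
      | succ k ih =>
        intro hk
        have h1 := ih (by omega)
        have h2 := pvRoundN_decrease G c d _ (hex k (by omega))
        rw [Function.iterate_succ_apply']
        omega
    have := hgrow G.length (le_refl _)
    omega

-- ===== VERDICT (by name: the statement is the Claim_ definition above) =====
set_option maxHeartbeats 1000000 in
theorem safetyFly_spec : Claim_equal_safetyFly := by
  intro G s e c d _ hpre
  obtain ⟨hs1, hs2, he1, he2, hadj⟩ := hpre
  have hn : 0 < G.length := by
    by_contra h
    have : G.length = 0 := by omega
    rw [this] at hs1 hs2
    omega
  have hs' : pvIdx G.length s < G.length := pvIdx_lt _ _ hs1 hs2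
  -- every reachable node is below n and lies in every closed subset, so its edges are in range
  have hreach : ∀ x, Relation.ReflTransGen (pvStep G c d) (pvIdx G.length s) x →
      x < G.length ∧ ∀ S ∈ (Finset.range G.length).powerset,
        pvIdx G.length s ∈ S →
        (∀ w ∈ S, ∀ p ∈ G.getD w [],
           (-(G.length : Int) ≤ p.1 ∧ p.1 < G.length ∧ pvCond c d p.2 = true) →
           pvIdx G.length p.1 ∈ S) →
        x ∈ S := by
    intro x hx
    induction hx with
    | refl => exact ⟨hs', fun S _ hsS _ => hsS⟩
    | tail _ hstep ihb =>
      obtain ⟨p, hp, hidx, hcond⟩ := hstep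
      rename_i b _ _
      have hgood : ∀ q ∈ G.getD b [], -(G.length : Int) ≤ q.1 ∧ q.1 < G.length :=
        hadj b (Finset.mem_range.mpr ihb.1) ihb.2
      refine ⟨by rw [← hidx]; exact pvIdx_lt _ _ (hgood p hp).1 (hgood p hp).2, ?_⟩
      intro S hS hsS hcl
      have hbS : b ∈ S := ihb.2 S hS hsS hcl
      have := hcl b hbS p hp ⟨(hgood p hp).1, (hgood p hp).2, hcond⟩
      rwa [hidx] at this
  have Hadj : ∀ u : Nat, Relation.ReflTransGen (pvStep G c d) (pvIdx G.length s) u →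
      ∀ p ∈ G.getD u [], -(G.length : Int) ≤ p.1 ∧ p.1 < G.length := by
    intro u hu
    exact hadj u (Finset.mem_range.mpr (hreach u hu).1) (hreach u hu).2
  have HG : ∀ x, Relation.ReflTransGen (pvStep G c d) (pvIdx G.length s) x →
      ∀ p ∈ G.getD x [], pvIdx G.length p.1 < G.length := by
    intro x hx p hp
    have hgood := Hadj x hx p hp
    exact pvIdx_lt _ _ hgood.1 hgood.2
  have hlenrep : (List.replicate G.length false).length = G.length := by simp
  -- A's final visited list
  obtain ⟨A1, _, _, A4⟩ := pvDfsA_complete G c d (pvIdx G.length s) HG (G.length + 1)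
    (List.replicate G.length false) (pvIdx G.length s) Relation.ReflTransGen.refl hlenrep hs'
    (pvMarked_replicate _ _) (by simp)
  have charA : ∀ x, pvMarked (pvDfsA G c d (G.length + 1)
      (List.replicate G.length false) (pvIdx G.length s)) x ↔
      Relation.ReflTransGen (pvStep G c d) (pvIdx G.length s) x := by
    intro x
    constructor
    · intro hx
      rcases pvDfsA_sound G c d (G.length + 1) _ _ x hx with hold | hr
      · exact absurd hold (pvMarked_replicate _ _)
      · exact hr
    · intro hr
      induction hr with
      | refl => exact A1
      | tail _ hstep ihb => exact A4 _ ihb (pvMarked_replicate _ _) _ hstep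
  -- B's initial array
  have hr0eq : PySem.List.pySetD (List.replicate G.length false) s true
      = (List.replicate G.length false).set (pvIdx G.length s) true := by
    rw [pvPySetD_idx _ _ _ (by rw [hlenrep]; exact hs1) (by rw [hlenrep]; exact hs2), hlenrep]
  have hg0 : (List.replicate G.length false).getD (pvIdx G.length s) false = false := by
    cases hgg : (List.replicate G.length false).getD (pvIdx G.length s) false
    · rfl
    · exact absurd hgg (pvMarked_replicate _ _)
  have hc0 : ((List.replicate G.length false).set (pvIdx G.length s) true).count false
      < G.length := by
    have h1 := pvCount_set (List.replicate G.length false) (pvIdx G.length s) (by omega) hg0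
    have h2 : (List.replicate G.length false).count false = G.length := by simp
    omega
  have hgood0 : pvGoodB G c d (pvIdx G.length s)
      ((List.replicate G.length false).set (pvIdx G.length s) true) := by
    constructor
    · rw [List.length_set]; exact hlenrep
    · intro x hx
      rcases pvMarked_set_cases _ _ _ hx with rfl | hx'
      · exact Relation.ReflTransGen.refl
      · exact absurd hx' (pvMarked_replicate _ _)
  have hfix := pvIterB_fix G c d _ hc0
  have hfingood := pvIterB_good G c d (pvIdx G.length s) Hadj _ hgood0 G.length
  -- characterization of B's final marking
  have charB : ∀ x, pvMarked ((pvRoundN G c d)^[G.length]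
      ((List.replicate G.length false).set (pvIdx G.length s) true)) x ↔
      Relation.ReflTransGen (pvStep G c d) (pvIdx G.length s) x := by
    intro x
    constructor
    · intro hx
      exact hfingood.2 x hx
    · intro hr
      induction hr with
      | refl =>
        exact pvIterB_mono G c d _ _
          (pvMarked_set_self (List.replicate G.length false) _ (by simpa using hs')) G.length
      | tail hpre hstep ihb =>
        rename_i b y
        obtain ⟨p, hp, hidx, hcond⟩ := hstep
        have hbn : b < G.length := by
          have := pvMarked_lt _ _ ihb
          rwa [hfingood.1] at this
        have hReachb : Relation.ReflTransGen (pvStep G c d) (pvIdx G.length s) b :=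
          hfingood.2 b ihb
        have hrange := Hadj b hReachb p hp
        have := pvRoundN_marks G c d _ hfingood.1 b hbn ihb p hp
          (by rw [pvOk_eq_cond]; exact hcond) hrange.1 hrange.2
        rw [hfix, hidx] at this
        exact this
  -- unfold both programs
  show safetyFly G s e c d = safetyFly_alt G s e c d
  have hBrun : safetyFly_alt G s e c d = PySem.List.pyGetD
      ((pvRoundN G c d)^[G.length]
        ((List.replicate G.length false).set (pvIdx G.length s) true)) e false := by
    show PySem.List.pyGetD
        ((PySem.List.pyRange 0 (G.length : Int) 1).foldl
          (fun reach _ => pvRoundB G c d reach)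
          (PySem.List.pySetD (List.replicate G.length false) s true)) e false = _
    rw [PySem.List.pyRange_zero_natCast, pvFoldl_const_iterate, pvRoundB_eq, hr0eq]
    simp
  rw [hBrun]
  have hfinlen : ((pvRoundN G c d)^[G.length]
      ((List.replicate G.length false).set (pvIdx G.length s) true)).length = G.length :=
    hfingood.1
  rw [pvPyGetD_idx _ _ _ (by rw [hfinlen]; exact he1) (by rw [hfinlen]; exact he2), hfinlen]
  show (pvDfsA G c d (G.length + 1) (List.replicate G.length false)
      (pvIdx G.length s)).getD (pvIdx G.length e) false = _
  have hiff := (charA (pvIdx G.length e)).trans (charB (pvIdx G.length e)).symm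
  unfold pvMarked at hiff
  cases hA : (pvDfsA G c d (G.length + 1) (List.replicate G.length false)
      (pvIdx G.length s)).getD (pvIdx G.length e) false <;>
    cases hB : ((pvRoundN G c d)^[G.length]
      ((List.replicate G.length false).set (pvIdx G.length s) true)).getD
      (pvIdx G.length e) false <;>
    simp_all
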